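-- pv_equiv track=rewrite | github.com/Panchob/Advent-of-code | 2019/Day16/day16.py | offsetPhasing
-- ===== SOURCE A (Python) =====
-- def offsetPhasing(signal):
--     out = []
--     previous = 0
--     for n in reversed(signal):
--         current = (previous + n) % 10
--         out.insert(0, current)
--         previous = current
--     return out
-- ===== SOURCE B (Python) =====
-- def offsetPhasing(sig):
--     total = sum(sig)
--     out = []
--     for n in sig:
--         out.append(total % 10)
--         total -= n
--     return out
-- ===== Notes on version B (the rewrite author's own statement) =====
-- stated objective: faster
-- what changed: B precomputes the total sum and does a forward pass with a decreasing remaining-sum accumulator and append, instead of A's reverse pass with a running mod accumulator and quadratic insert(0, ...).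
import Mathlib
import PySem

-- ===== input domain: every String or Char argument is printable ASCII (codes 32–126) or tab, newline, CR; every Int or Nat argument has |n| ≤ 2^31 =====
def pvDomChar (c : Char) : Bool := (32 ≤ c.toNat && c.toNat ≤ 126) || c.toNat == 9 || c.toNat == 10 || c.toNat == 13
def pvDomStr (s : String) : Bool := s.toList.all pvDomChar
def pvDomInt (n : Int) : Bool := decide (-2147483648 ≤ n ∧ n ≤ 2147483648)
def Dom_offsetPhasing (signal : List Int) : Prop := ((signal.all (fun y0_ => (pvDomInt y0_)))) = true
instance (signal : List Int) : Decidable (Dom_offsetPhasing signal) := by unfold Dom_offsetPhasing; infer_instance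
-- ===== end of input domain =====

-- B replaces A's reverse pass with quadratic insert(0,...) by a forward O(n) pass over a precomputed total sum.


-- ===== PORT A =====
-- loop body of A: current = (previous + n) % 10; out.insert(0, current); previous = current
def stepA (st : List Int × Int) (n : Int) : List Int × Int :=
  let current := PySem.Int.mod (st.2 + n) 10
  (current :: st.1, current)

def offsetPhasing (signal : List Int) : List Int :=
  (signal.reverse.foldl stepA ([], 0)).1

-- ===== PORT B =====
-- loop body of B: out.append(total % 10); total -= n
def stepB (st : List Int × Int) (n : Int) : List Int × Int :=
  (st.1 ++ [PySem.Int.mod st.2 10], st.2 - n)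

def offsetPhasing_alt (signal : List Int) : List Int :=
  let total := signal.foldl (· + ·) 0
  (signal.foldl stepB ([], total)).1

-- ===== PRECONDITION & SPEC =====
def Spec_offsetPhasing (signal : List Int) (out : List Int) : Prop := out = offsetPhasing_alt signal
instance (signal : List Int) (out : List Int) : Decidable (Spec_offsetPhasing signal out) := by unfold Spec_offsetPhasing; infer_instance

-- ===== CLAIM (what is proved, stated in full; the proofs are below) =====
def Claim_equal_offsetPhasing : Prop := ∀ (signal : List Int), Dom_offsetPhasing signal → Spec_offsetPhasing signal (offsetPhasing signal)

-- ===== LEMMAS AND PROOFS =====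

-- the common value: list of suffix sums mod 10
def gsuf : List Int → List Int
  | [] => []
  | x :: xs => (x + xs.sum) % 10 :: gsuf xs

theorem pymod_ten (a : Int) : PySem.Int.mod a 10 = a % 10 :=
  PySem.Int.mod_eq_emod_of_pos (by norm_num)

-- A's fold over the reversed list produces gsuf, with state snd congruent to the suffix sum mod 10
theorem foldA_eq (ys : List Int) :
    (ys.reverse.foldl stepA ([], 0)).1 = gsuf ys ∧
    (ys.reverse.foldl stepA ([], 0)).2 % 10 = ys.sum % 10 := by
  induction ys with
  | nil => simp [gsuf]
  | cons x xs ih =>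
    have hrev : (x :: xs).reverse = xs.reverse ++ [x] := by simp
    rw [hrev, List.foldl_append]
    obtain ⟨h1, h2⟩ := ih
    simp only [List.foldl_cons, List.foldl_nil, stepA, gsuf, pymod_ten, List.sum_cons]
    rw [h1]
    refine ⟨?_, ?_⟩
    · have : ((List.foldl stepA ([], 0) xs.reverse).2 + x) % 10 = (x + xs.sum) % 10 := by omega
      rw [this]
    · omega

theorem foldB_append (xs : List Int) (acc : List Int) (t : Int) :
    (xs.foldl stepB (acc, t)).1 = acc ++ (xs.foldl stepB ([], t)).1 ∧
    (xs.foldl stepB (acc, t)).2 = (xs.foldl stepB ([], t)).2 := by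
  induction xs generalizing acc t with
  | nil => simp
  | cons x xs ih =>
    simp only [List.foldl_cons, stepB, List.nil_append]
    obtain ⟨h1, h2⟩ := ih (acc ++ [PySem.Int.mod t 10]) (t - x)
    obtain ⟨g1, g2⟩ := ih [PySem.Int.mod t 10] (t - x)
    refine ⟨?_, by rw [h2, g2]⟩
    rw [h1, g1]; simp

theorem foldB_eq (xs : List Int) (t : Int) (ht : t = xs.sum) :
    (xs.foldl stepB ([], t)).1 = gsuf xs := by
  induction xs generalizing t with
  | nil => simp [gsuf]
  | cons x xs ih =>
    simp only [List.foldl_cons, stepB, List.nil_append]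
    obtain ⟨h1, _⟩ := foldB_append xs [PySem.Int.mod t 10] (t - x)
    rw [h1, ih (t - x) (by simp [ht])]
    simp [gsuf, ht]

-- ===== VERDICT (by name: the statement is the Claim_ definition above) =====
theorem offsetPhasing_spec : Claim_equal_offsetPhasing := by
  intro signal _
  unfold Spec_offsetPhasing offsetPhasing offsetPhasing_alt
  rw [(foldA_eq signal).1, foldB_eq signal _ (by simp [List.sum_eq_foldl])]
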